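-- pv_equiv track=rewrite | github.com/cnvogelg/amitools | amitools/vamos/lib/dos/PatternMatch.py | _pop_non_or
-- ===== SOURCE A (Python) =====
-- P_OREND = 0x84
--
-- def _pop_non_or(blocks, dst):
--     while True:
--         if len(blocks) == 0:
--             return dst
--         if blocks[-1] != P_OREND:
--             p = blocks.pop()
--             dst += chr(p)
--         else:
--             return dst
-- ===== SOURCE B (Python) =====
-- P_OREND = 0x84
--
-- def _pop_non_or(blocks, dst):
--     # find boundary of the trailing run of non-OREND bytes
--     i = len(blocks)
--     while i > 0 and blocks[i - 1] != P_OREND: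
--         i -= 1
--     # append the run in pop order (back to front) in one shot
--     dst += ''.join(chr(x) for x in reversed(blocks[i:]))
--     # same in-place shrink of the argument list as A's pops
--     del blocks[i:]
--     return dst
-- ===== Notes on version B (the rewrite author's own statement) =====
-- stated objective: alternative
-- what changed: Instead of a pop-one/append-one loop, B scans from the end for the boundary of the trailing non-OREND run, builds the appended string in one join over the reversed slice, and shrinks the list with one bulk del; Pre_ excludes trailing-run values outside the valid non-surrogate code-point range (chr raises ValueError for negatives/>0x10FFFF, and lone-surrogate results are not representable as Lean Strings).
-- outside the precondition, e.g. on _pop_non_or([-1], ''): A raises ValueError, B raises ValueError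
import Mathlib
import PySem

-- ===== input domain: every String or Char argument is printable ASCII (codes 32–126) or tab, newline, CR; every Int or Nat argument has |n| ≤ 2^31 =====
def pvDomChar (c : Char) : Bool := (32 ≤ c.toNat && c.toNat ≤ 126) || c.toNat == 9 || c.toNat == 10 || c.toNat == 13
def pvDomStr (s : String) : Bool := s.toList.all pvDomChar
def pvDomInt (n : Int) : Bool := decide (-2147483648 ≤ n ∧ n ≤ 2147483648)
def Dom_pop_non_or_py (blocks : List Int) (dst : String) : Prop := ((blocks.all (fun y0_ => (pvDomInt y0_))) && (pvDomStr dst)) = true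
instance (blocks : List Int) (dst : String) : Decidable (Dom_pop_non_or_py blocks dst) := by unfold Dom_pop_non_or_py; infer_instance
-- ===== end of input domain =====

-- B replaces A's pop-one/append-one loop by a boundary scan from the end plus one bulk
-- join/delete (objective: alternative decomposition, same linear cost). Both A and B mutate
-- `blocks` in place in the same way (A pops each element, B deletes the same suffix at once);
-- the theorems below are about the RETURN value.

-- chr(p): exact for valid non-surrogate code points (guaranteed by Pre_ below)
def pvChr (x : Int) : Char := Char.ofNat x.toNat

-- ===== PORT A =====
def pop_non_or_py (blocks : List Int) (dst : String) : String :=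
  if h : blocks = [] then dst                       -- if len(blocks) == 0: return dst
  else
    let p := blocks.getLast h                       -- blocks[-1]
    if p ≠ 132 then
      pop_non_or_py blocks.dropLast (dst.push (pvChr p))  -- p = blocks.pop(); dst += chr(p)
    else dst
termination_by blocks.length
decreasing_by simp [List.length_dropLast]; exact List.length_pos_iff.mpr h

-- ===== PORT B =====
-- i = len(blocks); while i > 0 and blocks[i-1] != P_OREND: i -= 1
def pvBoundary (bl : List Int) : Nat → Nat
  | 0 => 0
  | i + 1 => if bl.getD i 0 ≠ 132 then pvBoundary bl i else i + 1

def pop_non_or_py_alt (blocks : List Int) (dst : String) : String :=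
  let i := pvBoundary blocks blocks.length
  -- dst += ''.join(chr(x) for x in reversed(blocks[i:]))
  dst ++ String.ofList ((blocks.drop i).reverse.map pvChr)

-- ===== PRECONDITION & SPEC =====
-- Pre_ excludes inputs whose trailing run of non-OREND values contains a value that is
-- negative or > 0x10FFFF (there Python's chr raises ValueError) or a surrogate code point
-- 0xD800..0xDFFF (there A returns a lone-surrogate string that is not representable as a
-- Lean String; B returns the same string in Python).
def Pre_pop_non_or_py (blocks : List Int) (dst : String) : Prop :=
  ∀ x ∈ blocks.reverse.takeWhile (fun y => y ≠ 132),
    (0 ≤ x ∧ x < 55296) ∨ (57344 ≤ x ∧ x ≤ 1114111)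
instance (blocks : List Int) (dst : String) : Decidable (Pre_pop_non_or_py blocks dst) := by
  unfold Pre_pop_non_or_py; infer_instance

def pvWitness_pop_non_or_py : List Int × String := ([1, 132, 65, 66], "x")

def Spec_pop_non_or_py (blocks : List Int) (dst : String) (out : String) : Prop := out = pop_non_or_py_alt blocks dst
instance (blocks : List Int) (dst : String) (out : String) : Decidable (Spec_pop_non_or_py blocks dst out) := by unfold Spec_pop_non_or_py; infer_instance

-- ===== CLAIM (what is proved, stated in full; the proofs are below) =====
def Claim_equal_pop_non_or_py : Prop := ∀ (blocks : List Int) (dst : String), Dom_pop_non_or_py blocks dst → Pre_pop_non_or_py blocks dst → Spec_pop_non_or_py blocks dst (pop_non_or_py blocks dst)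

-- ===== LEMMAS AND PROOFS =====

-- A appends exactly the trailing non-132 run, read back to front.
theorem popA_eq (blocks : List Int) (dst : String) :
    pop_non_or_py blocks dst =
      dst ++ String.ofList ((blocks.reverse.takeWhile (fun y => y ≠ 132)).map pvChr) := by
  induction blocks using List.reverseRecOn generalizing dst with
  | nil => simp [pop_non_or_py]
  | append_singleton ys l ih =>
      rw [pop_non_or_py]
      by_cases hl : l = 132
      · subst hl
        simp
      · simp only [List.getLast_concat, List.dropLast_concat, hl, ne_eq,
          not_false_iff, if_true, dif_neg (by simp : ys ++ [l] ≠ [])]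
        rw [ih, ← String.toList_inj]
        simp [hl]

theorem pvBoundary_eq (bl : List Int) :
    ∀ i, i ≤ bl.length →
      pvBoundary bl i = i - ((bl.take i).reverse.takeWhile (fun y => y ≠ 132)).length := by
  intro i
  induction i with
  | zero => intro _; simp [pvBoundary]
  | succ i ih =>
      intro h
      have hi : i < bl.length := by omega
      have hg : bl.getD i 0 = bl[i] := List.getD_eq_getElem bl 0 hi
      have htake : bl.take (i + 1) = bl.take i ++ [bl[i]] := by
        rw [List.take_add_one]; simp [List.getElem?_eq_getElem hi]
      by_cases hx : bl[i] = 132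
      · rw [pvBoundary, hg]
        simp [hx, htake]
      · have hlen : ((bl.take i).reverse.takeWhile (fun y => decide (y ≠ 132))).length ≤ i := by
          calc ((bl.take i).reverse.takeWhile (fun y => decide (y ≠ 132))).length
              ≤ (bl.take i).reverse.length := (List.takeWhile_sublist _).length_le
            _ ≤ i := by simp
        have hTW : (bl.take (i + 1)).reverse.takeWhile (fun y => decide (y ≠ 132)) =
            bl[i] :: (bl.take i).reverse.takeWhile (fun y => decide (y ≠ 132)) := by
          rw [htake, List.reverse_append]; simp [hx]
        rw [pvBoundary, hg]
        simp only [hx, ne_eq, not_false_iff, if_true]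
        rw [ih (by omega), hTW]
        simp only [List.length_cons]
        omega

-- B also equals dst ++ the trailing run read back to front.
theorem popB_eq (blocks : List Int) (dst : String) :
    pop_non_or_py_alt blocks dst =
      dst ++ String.ofList ((blocks.reverse.takeWhile (fun y => y ≠ 132)).map pvChr) := by
  show dst ++ String.ofList ((blocks.drop (pvBoundary blocks blocks.length)).reverse.map pvChr) = _
  set t := blocks.reverse.takeWhile (fun y => decide (y ≠ 132)) with ht
  have hk : t.length ≤ blocks.length := by
    calc t.length ≤ blocks.reverse.length := (List.takeWhile_sublist _).length_le
      _ = blocks.length := List.length_reverse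
  have hb : pvBoundary blocks blocks.length = blocks.length - t.length := by
    rw [pvBoundary_eq blocks blocks.length (le_refl _)]
    simp [ht]
  have hpref : t = blocks.reverse.take t.length :=
    (List.prefix_iff_eq_take.mp (List.takeWhile_prefix _))
  have hdrop : (blocks.drop (blocks.length - t.length)).reverse = t := by
    rw [List.reverse_drop]
    have : blocks.length - (blocks.length - t.length) = t.length := by omega
    rw [this, ← hpref]
  rw [hb, hdrop]

-- ===== VERDICT (by name: the statement is the Claim_ definition above) =====
theorem pop_non_or_py_spec : Claim_equal_pop_non_or_py := by
  intro blocks dst _ _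
  unfold Spec_pop_non_or_py
  rw [popA_eq, popB_eq]
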